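-- pv_equiv track=rewrite | github.com/astroupia/codeforces-solutions | Number of Smaller.py | findSmallArray
-- ===== SOURCE A (Python) =====
-- def findSmallArray(a, b):
--     aIndicator = 0
--     newArray = []
--
--     for i in range(len(b) - 1):
--         while aIndicator < len(a) and a[aIndicator] < b[i]:
--             aIndicator += 1
--         newArray.append(aIndicator)
--
--     return newArray
-- ===== SOURCE B (Python) =====
-- from itertools import accumulate
-- from bisect import bisect_left
--
--
-- def findSmallArray(a, b):
--     # Prefix maxima of a are nondecreasing, so the sweep pointer's position
--     # after consuming b[i] is bisect_left(prefix_max, max(b[:i+1])).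
--     prefix_max = list(accumulate(a, max))
--     return [bisect_left(prefix_max, m) for m in accumulate(b[:-1], max)]
-- ===== Notes on version B (the rewrite author's own statement) =====
-- stated objective: alternative
-- what changed: Replaces A's stateful two-pointer sweep (a pointer shared across iterations of b) by stateless independent binary searches: each output is bisect_left on the prefix-maxima of a at the running maximum of b[:-1].
import Mathlib
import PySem

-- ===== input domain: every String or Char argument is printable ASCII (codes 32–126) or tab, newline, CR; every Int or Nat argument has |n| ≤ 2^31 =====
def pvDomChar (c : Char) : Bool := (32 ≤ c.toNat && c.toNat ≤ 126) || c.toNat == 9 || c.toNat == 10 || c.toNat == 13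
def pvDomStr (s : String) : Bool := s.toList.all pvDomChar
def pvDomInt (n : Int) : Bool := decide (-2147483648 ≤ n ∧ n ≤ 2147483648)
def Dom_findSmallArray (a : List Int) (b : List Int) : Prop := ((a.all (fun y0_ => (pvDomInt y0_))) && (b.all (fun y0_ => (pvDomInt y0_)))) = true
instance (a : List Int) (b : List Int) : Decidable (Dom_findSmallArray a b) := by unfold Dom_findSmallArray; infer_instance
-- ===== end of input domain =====

-- B replaces A's stateful pointer sweep by independent binary searches on the
-- prefix maxima of `a` against the running maxima of `b[:-1]` (objective: alternative).

-- ===== PORT A =====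
-- the `while aIndicator < len(a) and a[aIndicator] < b[i]` loop; the pointer stays in
-- [0, len(a)], so it is carried as a Nat and indexing with getD is exact
def advA (a : List Int) (x : Int) (p : Nat) : Nat :=
  if h : p < a.length then
    if a.getD p 0 < x then advA a x (p + 1) else p
  else p
termination_by a.length - p
decreasing_by omega

-- `for i in range(len(b) - 1)` reads b[0] … b[len(b)-2], i.e. the elements of b[:-1] in order
def findSmallArray (a : List Int) (b : List Int) : List Int :=
  ((b.dropLast).foldl
    (fun (st : Nat × List Int) x =>
      let p := advA a x st.1
      (p, st.2 ++ [(p : Int)]))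
    (0, ([] : List Int))).2

-- ===== PORT B =====
-- itertools.accumulate(l, max): running maxima (first element kept as is)
def runMaxFrom (c : Int) : List Int → List Int
  | [] => []
  | x :: xs => max c x :: runMaxFrom (max c x) xs

def runMax : List Int → List Int
  | [] => []
  | x :: xs => x :: runMaxFrom x xs

def findSmallArray_alt (a : List Int) (b : List Int) : List Int :=
  let prefixMax := runMax a
  (runMax b.dropLast).map (fun m => ((PySem.List.bisectLeft prefixMax m : Nat) : Int))

-- ===== PRECONDITION & SPEC =====
def Spec_findSmallArray (a : List Int) (b : List Int) (out : List Int) : Prop := out = findSmallArray_alt a b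
instance (a : List Int) (b : List Int) (out : List Int) : Decidable (Spec_findSmallArray a b out) := by unfold Spec_findSmallArray; infer_instance

-- ===== CLAIM (what is proved, stated in full; the proofs are below) =====
def Claim_equal_findSmallArray : Prop := ∀ (a : List Int) (b : List Int), Dom_findSmallArray a b → Spec_findSmallArray a b (findSmallArray a b)

-- ===== LEMMAS AND PROOFS =====

-- ---- facts about A's while loop ----
lemma advA_ge (a : List Int) (x : Int) (p : Nat) : p ≤ advA a x p := by
  fun_induction advA a x p with
  | case1 p h hlt ih => omega
  | case2 p h hlt => omega
  | case3 p h => omega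

lemma advA_le (a : List Int) (x : Int) (p : Nat) (hp : p ≤ a.length) :
    advA a x p ≤ a.length := by
  fun_induction advA a x p with
  | case1 p h hlt ih => exact ih (by omega)
  | case2 p h hlt => omega
  | case3 p h => omega

lemma advA_skipped (a : List Int) (x : Int) (p : Nat) :
    ∀ j, p ≤ j → j < advA a x p → a.getD j 0 < x := by
  fun_induction advA a x p with
  | case1 p h hlt ih =>
    intro j hj hj2
    rcases Nat.eq_or_lt_of_le hj with rfl | hj'
    · exact hlt
    · exact ih j hj' hj2
  | case2 p h hlt => intro j hj hj2; omega
  | case3 p h => intro j hj hj2; omega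

lemma advA_stop (a : List Int) (x : Int) (p : Nat)
    (h : advA a x p < a.length) : x ≤ a.getD (advA a x p) 0 := by
  fun_induction advA a x p with
  | case1 p h1 hlt ih => exact ih h
  | case2 p h1 hlt => exact le_of_not_gt hlt
  | case3 p h1 => omega

-- ---- facts about prefix maxima ----
lemma runMaxFrom_length (c : Int) (l : List Int) :
    (runMaxFrom c l).length = l.length := by
  induction l generalizing c with
  | nil => simp [runMaxFrom]
  | cons x xs ih => simp [runMaxFrom, ih]

lemma runMax_length (a : List Int) : (runMax a).length = a.length := by
  cases a with
  | nil => simp [runMax]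
  | cons x xs => simp [runMax, runMaxFrom_length]

lemma runMaxFrom_lt_iff (l : List Int) (c y : Int) (k : Nat) (hk : k < l.length) :
    (runMaxFrom c l).getD k 0 < y ↔ (c < y ∧ ∀ j, j ≤ k → l.getD j 0 < y) := by
  induction l generalizing c k with
  | nil => simp at hk
  | cons x xs ih =>
    cases k with
    | zero =>
      simp only [runMaxFrom, List.getD_cons_zero]
      constructor
      · intro h
        refine ⟨lt_of_le_of_lt (le_max_left _ _) h, ?_⟩
        intro j hj
        interval_cases j
        simpa using lt_of_le_of_lt (le_max_right _ _) h
      · rintro ⟨h1, h2⟩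
        have := h2 0 le_rfl
        simp only [List.getD_cons_zero] at this
        exact max_lt h1 this
    | succ k =>
      simp only [runMaxFrom, List.getD_cons_succ]
      rw [ih (max c x) k (by simpa using hk)]
      constructor
      · rintro ⟨h1, h2⟩
        refine ⟨lt_of_le_of_lt (le_max_left _ _) h1, ?_⟩
        intro j hj
        cases j with
        | zero => simpa using lt_of_le_of_lt (le_max_right _ _) h1
        | succ j => simpa using h2 j (by omega)
      · rintro ⟨h1, h2⟩
        refine ⟨max_lt h1 (by simpa using h2 0 (by omega)), ?_⟩
        intro j hj
        simpa using h2 (j + 1) (by omega)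

lemma runMax_lt_iff (a : List Int) (y : Int) (k : Nat) (hk : k < a.length) :
    (runMax a).getD k 0 < y ↔ ∀ j, j ≤ k → a.getD j 0 < y := by
  cases a with
  | nil => simp at hk
  | cons x xs =>
    cases k with
    | zero =>
      simp only [runMax, List.getD_cons_zero]
      constructor
      · intro h j hj; interval_cases j; simpa using h
      · intro h; simpa using h 0 le_rfl
    | succ k =>
      simp only [runMax, List.getD_cons_succ]
      rw [runMaxFrom_lt_iff xs x y k (by simpa using hk)]
      constructor
      · rintro ⟨h1, h2⟩ j hj
        cases j with
        | zero => simpa using h1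
        | succ j => simpa using h2 j (by omega)
      · intro h
        refine ⟨by simpa using h 0 (by omega), ?_⟩
        intro j hj
        simpa using h (j + 1) (by omega)

lemma a_le_runMax (a : List Int) (k : Nat) (hk : k < a.length) :
    a.getD k 0 ≤ (runMax a).getD k 0 := by
  by_contra h
  push Not at h
  exact absurd ((runMax_lt_iff a (a.getD k 0) k hk).mp h k le_rfl) (lt_irrefl _)

lemma runMax_mono (a : List Int) (i j : Nat) (hij : i ≤ j) (hj : j < a.length) :
    (runMax a).getD i 0 ≤ (runMax a).getD j 0 := by
  by_contra h
  push Not at h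
  have hall := (runMax_lt_iff a ((runMax a).getD i 0) j hj).mp h
  have : ¬ (runMax a).getD i 0 < (runMax a).getD i 0 := lt_irrefl _
  rw [runMax_lt_iff a _ i (by omega)] at this
  push Not at this
  obtain ⟨t, ht, ht2⟩ := this
  exact absurd (hall t (by omega)) (not_lt.mpr ht2)

lemma runMax_pairwise (a : List Int) :
    List.Pairwise (fun x1 x2 => x1 ≤ x2) (runMax a) := by
  rw [List.pairwise_iff_getElem]
  intro i j hi hj hij
  have hj' : j < a.length := by rwa [runMax_length] at hj
  have := runMax_mono a i j (le_of_lt hij) hj'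
  rwa [List.getD_eq_getElem _ _ hi, List.getD_eq_getElem _ _ hj] at this

-- ---- the sweep invariant: after consuming running maximum m, the pointer p is the
-- first index where the prefix maximum of a reaches m ----
def InvP (a : List Int) (p : Nat) (m : Int) : Prop :=
  p ≤ a.length ∧
  (∀ k, k < p → (runMax a).getD k 0 < m) ∧
  (p < a.length → m ≤ (runMax a).getD p 0)

lemma inv_lt_absurd (a : List Int) (r r' : Nat) (m : Int)
    (h : InvP a r m) (h' : InvP a r' m) (hlt : r < r') : False := by
  obtain ⟨hle, _, hpt⟩ := h
  obtain ⟨hle', hlo', _⟩ := h'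
  have hr : r < a.length := by omega
  exact absurd (hlo' r hlt) (not_lt.mpr (hpt hr))

lemma invP_unique (a : List Int) (r r' : Nat) (m : Int)
    (h : InvP a r m) (h' : InvP a r' m) : r = r' := by
  rcases lt_trichotomy r r' with hlt | heq | hgt
  · exact absurd (inv_lt_absurd a r r' m h h' hlt) (fun f => f)
  · exact heq
  · exact absurd (inv_lt_absurd a r' r m h' h hgt) (fun f => f)

lemma inv_init (a : List Int) (x : Int) : InvP a (advA a x 0) x := by
  refine ⟨advA_le a x 0 (by omega), ?_, ?_⟩
  · intro k hk
    have hk' : k < a.length := by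
      have := advA_le a x 0 (by omega); omega
    rw [runMax_lt_iff a x k hk']
    intro j hj
    exact advA_skipped a x 0 j (by omega) (by omega)
  · intro hr
    exact le_trans (advA_stop a x 0 hr) (a_le_runMax a _ hr)

lemma inv_step (a : List Int) (p : Nat) (m x : Int) (h : InvP a p m) :
    InvP a (advA a x p) (max m x) := by
  obtain ⟨hle, hlo, hpt⟩ := h
  have hrle : advA a x p ≤ a.length := advA_le a x p hle
  have hpr : p ≤ advA a x p := advA_ge a x p
  refine ⟨hrle, ?_, ?_⟩
  · intro k hk
    have hk' : k < a.length := by omega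
    rcases Nat.lt_or_ge k p with hkp | hkp
    · exact lt_of_lt_of_le (hlo k hkp) (le_max_left _ _)
    · rw [runMax_lt_iff a _ k hk']
      intro j hj
      rcases Nat.lt_or_ge j p with hjp | hjp
      · have := lt_of_le_of_lt (a_le_runMax a j (by omega)) (hlo j hjp)
        exact lt_of_lt_of_le this (le_max_left _ _)
      · exact lt_of_lt_of_le (advA_skipped a x p j hjp (by omega)) (le_max_right _ _)
  · intro hr
    have hx : x ≤ (runMax a).getD (advA a x p) 0 :=
      le_trans (advA_stop a x p hr) (a_le_runMax a _ hr)
    have hm : m ≤ (runMax a).getD (advA a x p) 0 :=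
      le_trans (hpt (by omega)) (runMax_mono a p (advA a x p) hpr hr)
    exact max_le hm hx

-- bisect_left on the prefix maxima lands exactly at the invariant pointer
lemma bisect_eq_of_inv (a : List Int) (r : Nat) (m : Int) (h : InvP a r m) :
    PySem.List.bisectLeft (runMax a) m = r := by
  obtain ⟨hlen, hlo, hhi⟩ := PySem.List.bisectLeft_spec (runMax a) m (runMax_pairwise a)
  refine invP_unique a _ r m ⟨by rwa [runMax_length] at hlen, ?_, ?_⟩ h
  · intro k hk
    have hk' : k < (runMax a).length := by omega
    have := hlo k hk' hk
    rwa [List.getD_eq_getElem _ _ hk']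
  · intro hr
    have hr' : PySem.List.bisectLeft (runMax a) m < (runMax a).length := by
      rwa [runMax_length]
    have := hhi _ hr' le_rfl
    rwa [List.getD_eq_getElem _ _ hr']

-- ---- loop shapes ----
def loopA (a : List Int) : List Int → Nat → List Int
  | [], _ => []
  | x :: xs, p => ((advA a x p : Nat) : Int) :: loopA a xs (advA a x p)

lemma foldl_loopA (a : List Int) (xs : List Int) (p : Nat) (acc : List Int) :
    (xs.foldl
      (fun (st : Nat × List Int) x =>
        let q := advA a x st.1
        (q, st.2 ++ [(q : Int)]))
      (p, acc)).2 = acc ++ loopA a xs p := by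
  induction xs generalizing p acc with
  | nil => simp [loopA]
  | cons x xs ih =>
    simp only [List.foldl_cons, loopA]
    rw [ih]
    simp

lemma loopA_eq (a : List Int) (xs : List Int) (p : Nat) (m : Int) (h : InvP a p m) :
    loopA a xs p
      = (runMaxFrom m xs).map
          (fun t => ((PySem.List.bisectLeft (runMax a) t : Nat) : Int)) := by
  induction xs generalizing p m with
  | nil => simp [loopA, runMaxFrom]
  | cons x xs ih =>
    have hstep := inv_step a p m x h
    simp only [loopA, runMaxFrom, List.map_cons]
    rw [bisect_eq_of_inv a _ _ hstep, ih _ _ hstep]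

-- ===== VERDICT (by name: the statement is the Claim_ definition above) =====
theorem findSmallArray_spec : Claim_equal_findSmallArray := by
  intro a b _
  unfold Spec_findSmallArray findSmallArray findSmallArray_alt
  rw [foldl_loopA]
  cases hb : b.dropLast with
  | nil => simp [loopA, runMax]
  | cons x xs =>
    have hinit := inv_init a x
    rw [show runMax (x :: xs) = x :: runMaxFrom x xs from rfl]
    simp only [loopA, List.map_cons, List.nil_append]
    rw [bisect_eq_of_inv a _ _ hinit, loopA_eq a xs _ x hinit]
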